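-- pv_equiv track=rewrite | github.com/Daniel6784/pythonProject | Agent.py | calcBottom
-- ===== SOURCE A (Python) =====
-- def calcBottom(piece):
--     lowest = dict()
--     # calculates the bottom of a peice
--     for part in piece:
--         if not part[1] in lowest.keys():
--             lowest[part[1]] = part[0]
--         elif lowest[part[1]] < part[0]:
--             lowest[part[1]] = part[0]
--     return lowest
-- ===== SOURCE B (Python) =====
-- def calcBottom(piece):
--     # Two-phase: group all row values by column, then take each group's max.
--     groups = {}
--     for r, c in piece:
--         groups.setdefault(c, []).append(r)
--     return {c: max(rs) for c, rs in groups.items()}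
-- ===== Notes on version B (the rewrite author's own statement) =====
-- stated objective: alternative
-- what changed: Replaces A's single loop with a running per-column maximum by a two-phase decomposition: one grouping pass building column -> list of rows, then a dict comprehension taking max of each group.
import Mathlib
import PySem

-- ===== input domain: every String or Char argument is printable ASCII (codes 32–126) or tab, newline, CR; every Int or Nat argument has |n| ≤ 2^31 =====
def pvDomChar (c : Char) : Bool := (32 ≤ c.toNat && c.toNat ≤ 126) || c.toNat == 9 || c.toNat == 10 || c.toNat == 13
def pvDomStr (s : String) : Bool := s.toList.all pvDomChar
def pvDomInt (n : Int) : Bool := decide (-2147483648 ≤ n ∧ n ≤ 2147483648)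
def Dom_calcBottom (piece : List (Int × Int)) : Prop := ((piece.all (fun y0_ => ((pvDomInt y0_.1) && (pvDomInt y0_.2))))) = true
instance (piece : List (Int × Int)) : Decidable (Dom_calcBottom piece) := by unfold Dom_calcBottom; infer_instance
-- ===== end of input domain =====

-- B replaces A's single running-maximum loop by a two-phase decomposition (group rows by column, then max per group); alternative structure, same cost.


-- ===== PORT A =====
-- for part in piece: if part[1] not in lowest: lowest[part[1]] = part[0]
--                    elif lowest[part[1]] < part[0]: lowest[part[1]] = part[0]
def calcBottomStepA (lowest : PySem.Dict Int Int) (part : Int × Int) : PySem.Dict Int Int :=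
  match lowest.get? part.2 with
  | none => lowest.insert part.2 part.1
  | some v => if v < part.1 then lowest.insert part.2 part.1 else lowest

def calcBottom (piece : List (Int × Int)) : List (Int × Int) :=
  (piece.foldl calcBottomStepA PySem.Dict.empty).items

-- ===== PORT B =====
-- max(rs)  (rs is never empty where this is applied; .getD 0 only totalises)
def pvListMax (rs : List Int) : Int := (PySem.List.max? rs (fun y => y)).getD 0

-- groups.setdefault(c, []).append(r)  ==  groups[c] = groups.get(c, []) + [r]
def calcBottomGroups (piece : List (Int × Int)) : PySem.Dict Int (List Int) :=
  piece.foldl (fun g p => g.modify p.2 [] (fun l => l ++ [p.1])) PySem.Dict.empty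

-- {c: max(rs) for c, rs in groups.items()}
def calcBottom_alt (piece : List (Int × Int)) : List (Int × Int) :=
  ((calcBottomGroups piece).items.foldl
    (fun d p => d.insert p.1 (pvListMax p.2)) PySem.Dict.empty).items

-- ===== PRECONDITION & SPEC =====
def Spec_calcBottom (piece : List (Int × Int)) (out : List (Int × Int)) : Prop := out = calcBottom_alt piece
instance (piece : List (Int × Int)) (out : List (Int × Int)) : Decidable (Spec_calcBottom piece out) := by unfold Spec_calcBottom; infer_instance

-- ===== CLAIM (what is proved, stated in full; the proofs are below) =====
def Claim_equal_calcBottom : Prop := ∀ (piece : List (Int × Int)), Dom_calcBottom piece → Spec_calcBottom piece (calcBottom piece)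

-- ===== LEMMAS AND PROOFS =====

-- value map applied to a grouped entry
def pvMapMax (p : Int × List Int) : Int × Int := (p.1, pvListMax p.2)

theorem pvListMax_cons (x : Int) (t : List Int) : pvListMax (x :: t) = t.foldl max x := by
  simp [pvListMax, PySem.List.max?_id_cons]

theorem pvListMax_singleton (r : Int) : pvListMax [r] = r := by
  simp [pvListMax_cons]

theorem pvListMax_append (rs : List Int) (r : Int) (h : rs ≠ []) :
    pvListMax (rs ++ [r]) = if pvListMax rs < r then r else pvListMax rs := by
  cases rs with
  | nil => exact absurd rfl h
  | cons x t =>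
      rw [List.cons_append, pvListMax_cons, pvListMax_cons, List.foldl_append]
      simp only [List.foldl]
      by_cases h1 : t.foldl max x < r
      · simp [h1, max_eq_right (le_of_lt h1)]
      · simp [h1, max_eq_left (not_lt.mp h1)]

theorem get?_map_pvMapMax (l : List (Int × List Int)) (c : Int) :
    (PySem.Dict.mk (l.map pvMapMax)).get? c
      = ((PySem.Dict.mk l).get? c).map pvListMax := by
  induction l with
  | nil => simp [PySem.Dict.get?]
  | cons p rest ih =>
      obtain ⟨k, v⟩ := p
      simp only [List.map, pvMapMax, PySem.Dict.get?_mk_cons]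
      by_cases hk : (k == c) = true
      · simp [hk]
      · simp [hk, ih]

theorem keys_map_pvMapMax (l : List (Int × List Int)) :
    (PySem.Dict.mk (l.map pvMapMax)).keys = (PySem.Dict.mk l).keys := by
  simp only [PySem.Dict.keys, List.map_map]
  rfl

theorem contains_map_pvMapMax (l : List (Int × List Int)) (c : Int) :
    (PySem.Dict.mk (l.map pvMapMax)).contains c = (PySem.Dict.mk l).contains c := by
  rw [PySem.Dict.contains_eq_decide_mem_keys, PySem.Dict.contains_eq_decide_mem_keys,
    keys_map_pvMapMax]

-- one step of A on the max-image dict equals the max-image of one step of B's grouping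
theorem step_commute (g : PySem.Dict Int (List Int)) (part : Int × Int)
    (hnd : g.keys.Nodup) (hne : ∀ p ∈ g.items, p.2 ≠ []) :
    calcBottomStepA (PySem.Dict.mk (g.items.map pvMapMax)) part
      = PySem.Dict.mk ((g.modify part.2 [] (fun l => l ++ [part.1])).items.map pvMapMax) := by
  obtain ⟨r, c⟩ := part
  have hg : PySem.Dict.mk g.items = g := rfl
  unfold calcBottomStepA PySem.Dict.modify
  rw [get?_map_pvMapMax, hg]
  cases hq : g.get? c with
  | none =>
      have hcon : g.contains c = false := by
        rw [PySem.Dict.contains_eq_isSome_get?, hq]; rfl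
      have hget : g.getD c [] = [] := PySem.Dict.getD_of_get?_eq_none g [] hq
      simp only [Option.map_none]
      rw [hget]
      apply PySem.Dict.ext
      have hconM : (PySem.Dict.mk (g.items.map pvMapMax)).contains c = false := by
        rw [contains_map_pvMapMax, hg]; exact hcon
      rw [PySem.Dict.items_insert_of_not_contains _ r hconM,
        PySem.Dict.items_insert_of_not_contains g ([] ++ [r]) hcon]
      simp [pvMapMax, pvListMax_singleton]
  | some rs =>
      have hmem : (c, rs) ∈ g.items := PySem.Dict.mem_items_of_get?_eq_some g hq
      have hrs : rs ≠ [] := hne _ hmem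
      have hcon : g.contains c = true := by
        rw [PySem.Dict.contains_eq_isSome_get?, hq]; rfl
      have hconM : (PySem.Dict.mk (g.items.map pvMapMax)).contains c = true := by
        rw [contains_map_pvMapMax, hg]; exact hcon
      have hget : g.getD c [] = rs := PySem.Dict.getD_of_get?_eq_some g [] hq
      have hmax : pvListMax (rs ++ [r]) = if pvListMax rs < r then r else pvListMax rs :=
        pvListMax_append rs r hrs
      have huniq : ∀ p ∈ g.items, p.1 = c → p.2 = rs := by
        intro p hp hp1
        have : g.get? p.1 = some p.2 :=
          (PySem.Dict.get?_eq_some_iff_mem_items g p.1 p.2 hnd).mpr hp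
        rw [hp1, hq] at this
        exact (Option.some_inj.mp this).symm
      rw [hget]
      simp only [Option.map_some]
      apply PySem.Dict.ext
      by_cases hlt : pvListMax rs < r
      · simp only [hlt, if_true]
        rw [PySem.Dict.items_insert_of_contains _ r hconM,
          PySem.Dict.items_insert_of_contains g (rs ++ [r]) hcon]
        simp only [List.map_map]
        apply List.map_congr_left
        intro p hp
        by_cases hpc : p.1 = c
        · simp [Function.comp, pvMapMax, hpc, hmax, hlt]
        · simp [Function.comp, pvMapMax, hpc]
      · simp only [hlt, if_false]
        rw [PySem.Dict.items_insert_of_contains g (rs ++ [r]) hcon]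
        simp only [List.map_map]
        symm
        apply List.map_congr_left
        intro p hp
        by_cases hpc : p.1 = c
        · have hp2 : p.2 = rs := huniq p hp hpc
          simp [Function.comp, pvMapMax, hpc, hmax, hlt, hp2]
        · simp [Function.comp, pvMapMax, hpc]

theorem step_preserves_ne (g : PySem.Dict Int (List Int)) (part : Int × Int)
    (hne : ∀ p ∈ g.items, p.2 ≠ []) :
    ∀ p ∈ (g.modify part.2 [] (fun l => l ++ [part.1])).items, p.2 ≠ [] := by
  intro p hp
  unfold PySem.Dict.modify at hp
  rcases (PySem.Dict.mem_items_insert _ _ _ _).mp hp with h | h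
  · subst h; simp
  · exact hne _ h.1

theorem step_preserves_nd (g : PySem.Dict Int (List Int)) (part : Int × Int)
    (hnd : g.keys.Nodup) :
    (g.modify part.2 [] (fun l => l ++ [part.1])).keys.Nodup := by
  unfold PySem.Dict.modify
  exact PySem.Dict.nodup_keys_insert _ _ _ hnd

-- loop invariant: A's fold over the max-image tracks the max-image of B's grouping fold
theorem fold_commute (piece : List (Int × Int)) :
    ∀ (g : PySem.Dict Int (List Int)), g.keys.Nodup → (∀ p ∈ g.items, p.2 ≠ []) →
      piece.foldl calcBottomStepA (PySem.Dict.mk (g.items.map pvMapMax))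
        = PySem.Dict.mk ((piece.foldl (fun g p => g.modify p.2 [] (fun l => l ++ [p.1])) g).items.map pvMapMax) := by
  induction piece with
  | nil => intro g _ _; rfl
  | cons part rest ih =>
      intro g hnd hne
      simp only [List.foldl]
      rw [step_commute g part hnd hne]
      exact ih _ (step_preserves_nd g part hnd) (step_preserves_ne g part hne)

theorem groups_keys_nodup (piece : List (Int × Int)) : (calcBottomGroups piece).keys.Nodup := by
  unfold calcBottomGroups
  exact PySem.Dict.nodup_keys_foldl_modify_key piece (fun p => p.2) [] _ _
    PySem.Dict.nodup_keys_empty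

-- B's second phase (dict comprehension over fresh distinct keys) is the items map
theorem alt_eq_map (piece : List (Int × Int)) :
    calcBottom_alt piece = (calcBottomGroups piece).items.map pvMapMax := by
  unfold calcBottom_alt
  rw [PySem.Dict.items_foldl_insert_fresh (calcBottomGroups piece).items
      (fun p => p.1) (fun p => pvListMax p.2) PySem.Dict.empty
      (fun a _ => PySem.Dict.contains_empty _)
      (groups_keys_nodup piece)]
  rfl

-- ===== VERDICT (by name: the statement is the Claim_ definition above) =====
theorem calcBottom_spec : Claim_equal_calcBottom := by
  intro piece _
  unfold Spec_calcBottom calcBottom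
  rw [alt_eq_map]
  have h := fold_commute piece PySem.Dict.empty PySem.Dict.nodup_keys_empty
    (by intro p hp; simp [PySem.Dict.empty] at hp)
  have he : PySem.Dict.mk ((PySem.Dict.empty : PySem.Dict Int (List Int)).items.map pvMapMax)
      = (PySem.Dict.empty : PySem.Dict Int Int) := rfl
  rw [he] at h
  rw [h]
  rfl
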